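/- GENERATED by tools/from_farm_form.py from farm/worked/heap_alloc/Proof.lean (a worked proof of the farm's unit `heap_alloc`,
   accepted by the verdict) — do not edit. -/
import ProgX.Base.Spec.Units.heap_alloc

open X86 X86.User Asan ProgX.Base

set_option maxRecDepth 4000
set_option maxHeartbeats 4000000

/-- `heap_alloc` (c/base/heap.c, static; 0x104100 in the base image, 21 instructions) satisfies `ProgX.Base.Spec.heap_alloc.spec`, given the contract
of the runtime's `arena_unpoison`.
(Carried over from agent GA's proof against its test image, c/heap/heaptest.elf: tools/port_heap_units.py.) -/
theorem ProgX.Base.Spec.Proved.heap_alloc_ok : ProgX.Base.Spec.heap_alloc.Statement := by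
  intro Lay hLay μ hμ u₀ hcode hunpoison H rest frames u ret he hpre
  v_entry he
  obtain ⟨hp, hnc, hc16, hcmax⟩ := hpre
  have hok := hp.inv.heap
  have hbase := hp.base
  have hlimit := hp.limit
  have hcell := hok.cell
  have hroom := hok.room
  have hu16 := hok.used_aligned
  rw [hbase] at hcell hroom
  rw [hlimit] at hroom
  simp only [UInt64.reduceOfNat] at hcell
  u_walk hcode [hμ.vendor] span [ProgX.Base.L.textLo, ProgX.Base.L.textHi] side (v_side)
  case call_inv =>
    v_inv
  case pre_104157 =>
    -- the precondition of `arena_unpoison(H.next, n)`: 8-aligned, in the data space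
    have hfit : H.Fits (u.reg .rsi).toNat := by
      unfold Heap.Fits
      rw [hbase, hlimit]
      u_omega
    obtain ⟨r1, r2, r3, r4, r5⟩ := hok.next_range hfit
    have hle := le_r16 (u.reg .rdi).toNat
    rw [Heap.next_def, hbase] at r1 r2 r3 r4 r5
    show (s_104157.reg .rdi).toNat % 8 = 0 ∧ 0x100000 ≤ (s_104157.reg .rdi).toNat ∧
      (s_104157.reg .rdi).toNat + (s_104157.reg .rsi).toNat ≤ 0xC00000
    rw [w_rdi, w_rsi]
    refine ⟨?_, ?_, ?_⟩ <;> u_omega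
  case cont =>
    -- after `arena_unpoison`: `mov rax, rbx ; pop rbx ; ret`
    have hfit : H.Fits (u.reg .rsi).toNat := by
      unfold Heap.Fits
      rw [hbase, hlimit]
      u_omega
    obtain ⟨r1, r2, r3, r4, r5⟩ := hok.next_range hfit
    rw [Heap.next_def, hbase] at r1 r2 r3 r4 r5
    obtain ⟨hmem, hkeep⟩ := w_post
    v_after_call w_rsp_104157 w_mem_104157
    simp only [ProgX.Spec.arenaUnpoisonSpec_writes, shadowSpan, w_rdi_104157, w_rsi_104157] at w_same
    rw [w_rdi_104157, w_rsi_104157] at hmem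
    have hmem' := hmem.symm
    clear hmem
    have hs0 : UInt64.ofNat (s_104157r.mem.readLE (u.reg .rsp) 8) = ret := by
      u_frame he_retAddr
    have hp1 : UInt64.ofNat (s_104157.mem.readLE (u.reg .rsp - 8) 8) = u.reg .rbx := by u_resolve
    have hs1 : UInt64.ofNat (s_104157r.mem.readLE (u.reg .rsp - 8) 8) = u.reg .rbx := by
      rw [w_mem_104157] at hp1
      u_frame hp1
    u_walk hcode [hμ.vendor] span [ProgX.Base.L.textLo, ProgX.Base.L.textHi] side (v_side)
    refine ReachVia.done ?_
    v_returned
    · -- the post: success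
      have hnext : (UInt64.ofNat H.used + 8388672).toNat = H.next := by
        rw [Heap.next_def, hbase]
        u_omega
      have e32 : UInt64.ofNat (H.next - 32) = UInt64.ofNat H.used + 8388640 := by
        have e : H.next - 32 = H.used + 8388640 := by
          rw [Heap.next_def, hbase]
          omega
        rw [e, UInt64.ofNat_add]
        rfl
      have e24 : UInt64.ofNat (H.next - 24) = UInt64.ofNat H.used + 8388648 := by
        have e : H.next - 24 = H.used + 8388648 := by
          rw [Heap.next_def, hbase]
          omega
        rw [e, UInt64.ofNat_add]
        rfl
      have e16 : UInt64.ofNat (H.next - 16) = UInt64.ofNat H.used + 8388656 := by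
        have e : H.next - 16 = H.used + 8388656 := by
          rw [Heap.next_def, hbase]
          omega
        rw [e, UInt64.ofNat_add]
        rfl
      refine ⟨fun _ => ⟨?_, ?_⟩, fun hnf => absurd hfit hnf⟩
      · rw [w_rax]
        exact hnext
      · rw [w_mem, ← hmem', hnext]
        refine hp.inv.malloc hfit hnc hc16 ?_ ?_ ?_ ?_ ?_ ?_
        · -- no store of `heap_alloc` itself went to the shadow
          rw [w_mem_104157]
          v_untouched
        · -- the control cell
          rw [hbase, w_mem_104157]
          simp only [UInt64.reduceOfNat]
          u_read
        · rw [e32, w_mem_104157]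
          u_read
        · rw [e24, w_mem_104157]
          simp only [HState.magic]
          u_read
        · rw [e16, w_mem_104157]
          u_read
        · -- the older chunks are as they were
          rw [hbase, w_mem_104157]
          u_memnorm
          u_eqon
    · -- the footprint
      simp only [X86.User.Spec.footprint, vspec, shadowSpan, Heap.next_def, hbase]
      u_same
  case cont =>
    -- the request does not fit: `mov ebx, 0 ; mov rax, rbx ; pop rbx ; ret`
    have hnf : ¬ H.Fits (u.reg .rsi).toNat := by
      unfold Heap.Fits
      rw [hbase, hlimit]
      u_omega
    refine ReachVia.done ?_
    v_returned
    refine ⟨fun hfit => absurd hfit hnf, fun _ => ⟨w_rax, ?_, ?_, ?_⟩⟩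
    · refine hp.inv.eqOn (by v_untouched) ?_
      rw [hbase, hlimit]
      u_memnorm
      u_eqon
    · v_untouched
    · u_same
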